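-- pv_equiv track=rewrite | github.com/garyCC227/python_practice | even_digit.py | find_even_plus_num
-- ===== SOURCE A (Python) =====
-- def find_even_plus_num(num, largest_odd_digit, largest_odd_place):
--     len_ = len(str(num))
--     if(len_ == 1) :return num+1
--     num_list = list(str(num))
--     even_num = 0
--     len_ -= 1
--     for i in range((len_ + 1 - largest_odd_place)):
--         even_num += (int(num_list[i])*10**(len_))
--         len_ -= 1
--
--     even_num += (largest_odd_digit+1)*10**(largest_odd_place-1)
--     return even_num
-- ===== SOURCE B (Python) =====
-- def find_even_plus_num(num, largest_odd_digit, largest_odd_place):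
--     if num < 10:
--         return num + 1
--     pw = 10 ** largest_odd_place
--     return (num // pw) * pw + (largest_odd_digit + 1) * (pw // 10)
-- ===== Notes on version B (the rewrite author's own statement) =====
-- stated objective: simpler
-- what changed: Replaced the per-character loop over str(num) (string conversion, list, range, repeated int() and power) by one closed-form arithmetic expression: the preserved leading digits are num // 10**place, so the result is (num // 10**place)*10**place + (digit+1)*10**(place-1).
-- outside the precondition, e.g. on find_even_plus_num(-5, 3, 2): A returns 40, B returns -4; on find_even_plus_num(-123, 0, 5): A returns 10000, B returns -122
import Mathlib
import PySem

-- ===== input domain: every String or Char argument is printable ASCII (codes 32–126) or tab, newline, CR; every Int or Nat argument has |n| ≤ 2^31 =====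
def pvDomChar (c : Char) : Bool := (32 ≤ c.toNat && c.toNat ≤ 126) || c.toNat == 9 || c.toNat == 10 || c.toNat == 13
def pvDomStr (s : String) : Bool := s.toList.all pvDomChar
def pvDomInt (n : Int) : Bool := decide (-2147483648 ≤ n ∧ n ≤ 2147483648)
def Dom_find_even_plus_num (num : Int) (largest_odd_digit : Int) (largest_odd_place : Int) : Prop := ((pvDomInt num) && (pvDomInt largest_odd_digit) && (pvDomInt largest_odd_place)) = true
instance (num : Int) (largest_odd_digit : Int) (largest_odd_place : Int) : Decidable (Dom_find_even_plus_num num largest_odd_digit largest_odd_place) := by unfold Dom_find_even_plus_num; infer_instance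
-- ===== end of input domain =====

-- B replaces A's per-character loop over str(num) by one closed-form arithmetic
-- expression (floor division / multiplication); objective: simpler.

-- ===== PORT A =====
-- Literal transliteration of A.  int(num_list[i]) is ported as (ofChars? [c]).getD 0 and
-- 10**e as 10^e.toNat: inside Pre_ the character is always a decimal digit (so ofChars?
-- is some) and the exponents are ≥ 0 (Python would raise ValueError / leave Int otherwise;
-- those inputs are excluded by Pre_).
def find_even_plus_num (num : Int) (largest_odd_digit : Int) (largest_odd_place : Int) : Int :=
  let len0 : Int := PySem.Str.len (PySem.Int.toStr num)
  if len0 == 1 then num + 1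
  else
    let num_list : List Char := (PySem.Int.toStr num).toList
    -- state (even_num, len_) with len_ already decremented to len0 - 1 before the loop
    let st : Int × Int :=
      (PySem.List.pyRange 0 ((len0 - 1) + 1 - largest_odd_place) 1).foldl
        (fun (st : Int × Int) (i : Int) =>
          (st.1 + (PySem.Int.ofChars? [PySem.List.pyGetD num_list i ' ']).getD 0 * 10 ^ st.2.toNat,
           st.2 - 1))
        (0, len0 - 1)
    st.1 + (largest_odd_digit + 1) * 10 ^ (largest_odd_place - 1).toNat

-- ===== PORT B =====
-- Literal transliteration of Source B; 10**largest_odd_place ported as 10^·.toNat (under Pre_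
-- the exponent is ≥ 1; Python leaves Int for a negative exponent, excluded by Pre_).
def find_even_plus_num_alt (num : Int) (largest_odd_digit : Int) (largest_odd_place : Int) : Int :=
  if num < 10 then num + 1
  else
    let pw : Int := 10 ^ largest_odd_place.toNat
    PySem.Int.floordiv num pw * pw + (largest_odd_digit + 1) * PySem.Int.floordiv pw 10

-- ===== PRECONDITION & SPEC =====
-- Pre_ is A's natural positive-integer domain.  It excludes: multi-digit num with
-- largest_odd_place ≤ 0 (A raises IndexError, or returns a float at place 0); and all
-- negative num — outside the digit function's natural domain — where A raises ValueError
-- on the '-' sign whenever the loop runs, yet accidentally returns a value when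
-- largest_odd_place ≥ len(str(num)) makes the loop empty (e.g. (-5, 3, 2)).
def Pre_find_even_plus_num (num : Int) (largest_odd_digit : Int) (largest_odd_place : Int) : Prop :=
  (0 ≤ num ∧ num ≤ 9) ∨ (10 ≤ num ∧ 1 ≤ largest_odd_place)
instance (num : Int) (largest_odd_digit : Int) (largest_odd_place : Int) : Decidable (Pre_find_even_plus_num num largest_odd_digit largest_odd_place) := by unfold Pre_find_even_plus_num; infer_instance

def pvWitness_find_even_plus_num : Int × Int × Int := (5324, 5, 3)

def Spec_find_even_plus_num (num : Int) (largest_odd_digit : Int) (largest_odd_place : Int) (out : Int) : Prop := out = find_even_plus_num_alt num largest_odd_digit largest_odd_place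
instance (num : Int) (largest_odd_digit : Int) (largest_odd_place : Int) (out : Int) : Decidable (Spec_find_even_plus_num num largest_odd_digit largest_odd_place out) := by unfold Spec_find_even_plus_num; infer_instance

-- ===== CLAIM (what is proved, stated in full; the proofs are below) =====
def Claim_equal_find_even_plus_num : Prop := ∀ (num : Int) (largest_odd_digit : Int) (largest_odd_place : Int), Dom_find_even_plus_num num largest_odd_digit largest_odd_place → Pre_find_even_plus_num num largest_odd_digit largest_odd_place → Spec_find_even_plus_num num largest_odd_digit largest_odd_place (find_even_plus_num num largest_odd_digit largest_odd_place)

-- ===== LEMMAS AND PROOFS =====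

-- Recursive characterisation of the decimal digit string (most significant first).
def pvDigs (n : Nat) : List Char :=
  if h : n < 10 then [Nat.digitChar n] else pvDigs (n / 10) ++ [Nat.digitChar (n % 10)]
  decreasing_by exact Nat.div_lt_self (by omega) (by omega)

lemma pvToDigitsCore_eq (f : Nat) : ∀ (n : Nat) (acc : List Char), n < f →
    Nat.toDigitsCore 10 f n acc = pvDigs n ++ acc := by
  induction f with
  | zero => intro n acc h; omega
  | succ f ih =>
    intro n acc h
    rw [Nat.toDigitsCore]
    have hrec10 : ¬ n < 10 → pvDigs n = pvDigs (n / 10) ++ [Nat.digitChar (n % 10)] := by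
      intro h10; rw [pvDigs]; simp [h10]
    by_cases h10 : n < 10
    · have hz : n / 10 = 0 := Nat.div_eq_of_lt h10
      have hsm : pvDigs n = [Nat.digitChar n] := by rw [pvDigs]; simp [h10]
      simp [hz, hsm, Nat.mod_eq_of_lt h10]
    · have hne : ¬ n / 10 = 0 := by
        intro hz; have := Nat.div_lt_iff_lt_mul (by omega : 0 < 10) |>.mp (by omega : n / 10 < 1); omega
      simp only [hne, if_false]
      rw [ih (n / 10) _ (by have := Nat.div_lt_self (by omega : 0 < n) (by omega : 1 < 10); omega)]
      rw [hrec10 h10]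
      simp

lemma pvToDigits_eq (n : Nat) : Nat.toDigits 10 n = pvDigs n := by
  have := pvToDigitsCore_eq (n + 1) n [] (by omega)
  simpa [Nat.toDigits] using this

lemma pvDigs_len_pos (n : Nat) : 0 < (pvDigs n).length := by
  rw [pvDigs]; split <;> simp

lemma pvDigs_lt (n : Nat) : n < 10 ^ (pvDigs n).length := by
  induction n using Nat.strong_induction_on with
  | _ n ih =>
    rw [pvDigs]
    by_cases h : n < 10
    · simp [h]
    · simp only [h, dif_neg, not_false_iff, List.length_append, List.length_singleton]
      have hd := ih (n / 10) (Nat.div_lt_self (by omega) (by omega))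
      have hdm := Nat.div_add_mod n 10
      have hmlt : n % 10 < 10 := Nat.mod_lt _ (by omega)
      calc n < (n / 10 + 1) * 10 := by omega
        _ ≤ 10 ^ (pvDigs (n / 10)).length * 10 := by
            have : n / 10 + 1 ≤ 10 ^ (pvDigs (n / 10)).length := hd
            exact Nat.mul_le_mul_right 10 this
        _ = 10 ^ ((pvDigs (n / 10)).length + 1) := by ring

lemma pvDigs_two_le (n : Nat) (h : 10 ≤ n) : 2 ≤ (pvDigs n).length := by
  rw [pvDigs]
  simp only [show ¬ n < 10 by omega, dif_neg, not_false_iff, List.length_append,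
    List.length_singleton]
  have := pvDigs_len_pos (n / 10)
  omega

lemma pvDigs_getD (n : Nat) : ∀ (k : Nat), k < (pvDigs n).length →
    (pvDigs n).getD k ' ' = Nat.digitChar ((n / 10 ^ ((pvDigs n).length - 1 - k)) % 10) := by
  induction n using Nat.strong_induction_on with
  | _ n ih =>
    intro k hk
    by_cases h : n < 10
    · have hsm : pvDigs n = [Nat.digitChar n] := by rw [pvDigs]; simp [h]
      rw [hsm] at hk ⊢
      simp only [List.length_singleton] at hk
      interval_cases k
      simp [Nat.mod_eq_of_lt h]
    · have hrec : pvDigs n = pvDigs (n / 10) ++ [Nat.digitChar (n % 10)] := by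
        rw [pvDigs]; simp [h]
      have hlen : (pvDigs n).length = (pvDigs (n / 10)).length + 1 := by
        rw [hrec]; simp
      rw [hrec] at hk
      simp only [List.length_append, List.length_singleton] at hk
      rw [hrec]
      simp only [List.length_append, List.length_singleton]
      by_cases hk' : k < (pvDigs (n / 10)).length
      · rw [List.getD_append _ _ _ _ hk']
        rw [ih (n / 10) (Nat.div_lt_self (by omega) (by omega)) k hk']
        have hexp : (pvDigs (n / 10)).length + 1 - 1 - k = ((pvDigs (n / 10)).length - 1 - k) + 1 := by
          omega
        rw [hexp, pow_succ, Nat.mul_comm, ← Nat.div_div_eq_div_mul]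
      · have hke : k = (pvDigs (n / 10)).length := by omega
        subst hke
        simp

-- The loop invariant: after k iterations even_num holds the top k digits in place.
lemma pvLoopA (m : Nat) (hm : 10 ≤ m) :
    ∀ (k : Nat), k ≤ (pvDigs m).length →
    (PySem.List.pyRange 0 (k : Int) 1).foldl
      (fun (st : Int × Int) (i : Int) =>
        (st.1 + (PySem.Int.ofChars? [PySem.List.pyGetD (pvDigs m) i ' ']).getD 0 * 10 ^ st.2.toNat,
         st.2 - 1))
      (0, ((pvDigs m).length : Int) - 1)
    = (((m / 10 ^ ((pvDigs m).length - k) * 10 ^ ((pvDigs m).length - k) : Nat) : Int),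
       ((pvDigs m).length : Int) - 1 - k) := by
  intro k
  induction k with
  | zero =>
    intro _
    have : m / 10 ^ (pvDigs m).length = 0 := Nat.div_eq_of_lt (pvDigs_lt m)
    simp [this]
  | succ k ihk =>
    intro hk
    have hk' : k ≤ (pvDigs m).length := by omega
    have hcons : PySem.List.pyRange 0 ((k : Int) + 1) 1
        = PySem.List.pyRange 0 (k : Int) 1 ++ [(k : Int)] := by
      exact PySem.List.pyRange_one_succ_right (by omega)
    have hcast : ((k + 1 : Nat) : Int) = (k : Int) + 1 := by push_cast; ring
    rw [hcast, hcons, List.foldl_append, ihk hk']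
    simp only [List.foldl_cons, List.foldl_nil]
    have hkl : k < (pvDigs m).length := by omega
    rw [PySem.List.pyGetD_natCast, pvDigs_getD m k hkl]
    set L := (pvDigs m).length with hL
    have hdig : (m / 10 ^ (L - 1 - k)) % 10 < 10 := Nat.mod_lt _ (by omega)
    have hof : (PySem.Int.ofChars? [Nat.digitChar ((m / 10 ^ (L - 1 - k)) % 10)]).getD 0
        = (((m / 10 ^ (L - 1 - k)) % 10 : Nat) : Int) := by
      set d := (m / 10 ^ (L - 1 - k)) % 10 with hd
      interval_cases d <;> decide
    rw [hof]
    have htn : (((L : Int) - 1 - k).toNat) = L - 1 - k := by omega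
    rw [Prod.mk.injEq]
    refine ⟨?_, ?_⟩
    · -- first component
      rw [htn]
      have hj : L - k = (L - 1 - k) + 1 := by omega
      have hj2 : L - (k + 1) = L - 1 - k := by omega
      rw [hj, hj2]
      have hsplit : m / 10 ^ (L - 1 - k) = (m / 10 ^ ((L - 1 - k) + 1)) * 10 + (m / 10 ^ (L - 1 - k)) % 10 := by
        conv_lhs => rw [← Nat.div_add_mod (m / 10 ^ (L - 1 - k)) 10]
        rw [Nat.div_div_eq_div_mul, ← pow_succ]
        ring
      have key : (m / 10 ^ ((L - 1 - k) + 1)) * 10 ^ ((L - 1 - k) + 1)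
          + ((m / 10 ^ (L - 1 - k)) % 10) * 10 ^ (L - 1 - k)
          = (m / 10 ^ (L - 1 - k)) * 10 ^ (L - 1 - k) := by
        conv_rhs => rw [hsplit]
        ring
      exact_mod_cast key
    · ring

-- On the whole multi-digit branch the loop value equals floor(num / 10^p) * 10^p.
lemma pvMain (num largest_odd_digit largest_odd_place : Int)
    (hnum : 10 ≤ num) (hp : 1 ≤ largest_odd_place) :
    find_even_plus_num num largest_odd_digit largest_odd_place
      = find_even_plus_num_alt num largest_odd_digit largest_odd_place := by
  set m : Nat := num.toNat with hm
  have hnumm : num = (m : Int) := by omega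
  have hm10 : 10 ≤ m := by omega
  have hchars : (PySem.Int.toStr num).toList = pvDigs m := by
    rw [PySem.Int.toList_toStr, PySem.Int.toChars]
    rw [if_neg (by omega), ← hm, pvToDigits_eq]
  set L := (pvDigs m).length with hLdef
  have hL2 : 2 ≤ L := pvDigs_two_le m hm10
  have hlen : PySem.Str.len (PySem.Int.toStr num) = (L : Int) := by
    rw [PySem.Str.len_eq, hchars]
  -- the place as a Nat
  set p : Nat := largest_odd_place.toNat with hpdef
  have hpI : largest_odd_place = (p : Int) := by omega
  have hp1 : 1 ≤ p := by omega
  -- unfold both ports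
  rw [find_even_plus_num, find_even_plus_num_alt]
  simp only [hlen, hchars]
  rw [if_neg (by simpa using (by omega : ¬ (L : Int) = 1)), if_neg (by omega : ¬ num < 10)]
  -- the loop bound
  have hbound : ((L : Int) - 1) + 1 - largest_odd_place = ((L : Int) - p) := by
    rw [hpI]; ring
  rw [hbound]
  have hfd : PySem.Int.floordiv num (10 ^ p) = ((m / 10 ^ p : Nat) : Int) := by
    rw [hnumm]
    have : (10 : Int) ^ p = ((10 ^ p : Nat) : Int) := by push_cast; ring
    rw [this]
    exact PySem.Int.floordiv_natCast m (10 ^ p)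
  have hfd10 : PySem.Int.floordiv ((10 : Int) ^ p) 10 = ((10 ^ (p - 1) : Nat) : Int) := by
    have h1 : (10 : Int) ^ p = ((10 ^ p : Nat) : Int) := by push_cast; ring
    have h2 : (10 : Int) = ((10 : Nat) : Int) := by norm_num
    rw [h1, h2, PySem.Int.floordiv_natCast]
    congr 1
    have : 10 ^ p = 10 ^ (p - 1) * 10 := by
      conv_lhs => rw [show p = (p - 1) + 1 by omega]
      rw [pow_succ]
    omega
  by_cases hcase : p < L
  · -- the loop runs L - p times
    have hkk : ((L : Int) - p) = ((L - p : Nat) : Int) := by omega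
    rw [hkk]
    have := pvLoopA m hm10 (L - p) (by omega)
    rw [← hLdef] at this
    rw [this]
    have hLp : L - (L - p) = p := by omega
    rw [hLp]
    simp only []
    rw [hfd, hfd10]
    have hpt : (largest_odd_place - 1).toNat = p - 1 := by omega
    rw [hpt]
    push_cast
    ring
  · -- empty loop: p ≥ L, the quotient is 0
    have hempty : PySem.List.pyRange 0 ((L : Int) - p) 1 = [] := by
      have h0 : ((L : Int) - p - 0).toNat = 0 := by omega
      rw [PySem.List.pyRange_one, h0]
      rfl
    rw [hempty]
    simp only [List.foldl_nil]
    have hq : m / 10 ^ p = 0 := by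
      apply Nat.div_eq_of_lt
      calc m < 10 ^ L := pvDigs_lt m
        _ ≤ 10 ^ p := Nat.pow_le_pow_right (by omega) (by omega)
    rw [hfd, hfd10, hq]
    have hpt : (largest_odd_place - 1).toNat = p - 1 := by omega
    rw [hpt]
    push_cast
    ring

lemma pvSmall (num largest_odd_digit largest_odd_place : Int)
    (h0 : 0 ≤ num) (h9 : num ≤ 9) :
    find_even_plus_num num largest_odd_digit largest_odd_place
      = find_even_plus_num_alt num largest_odd_digit largest_odd_place := by
  have hlen : PySem.Str.len (PySem.Int.toStr num) = 1 := by
    interval_cases num <;> decide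
  rw [find_even_plus_num, find_even_plus_num_alt]
  simp only [hlen]
  rw [if_pos (by decide), if_pos (by omega : num < 10)]

-- ===== VERDICT (by name: the statement is the Claim_ definition above) =====
theorem find_even_plus_num_spec : Claim_equal_find_even_plus_num := by
  intro num lod p _ hpre
  unfold Spec_find_even_plus_num
  rcases hpre with ⟨h0, h9⟩ | ⟨h10, hp⟩
  · exact pvSmall num lod p h0 h9
  · exact pvMain num lod p h10 hp
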